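-- pv_equiv track=rewrite | github.com/doggysheriff/codingfinal | zombieFinal.py | adjust_suspicion
-- ===== SOURCE A (Python) =====
-- def adjust_suspicion(response, suspicion_level):
--     # Keywords that increase or decrease suspicion
--     increase_keywords = ["bite", "starve", "infect", "hungry", "eat", "visiting", "hunger", "dying", "die"]
--     decrease_keywords = ["friend", "business", "lover", "doctor", "medicine"]
--     #Increase/lower suspicion based on keywords in the response
--     words = response.lower().split()
--     for word in words: # For loop that will be used to execute a group of statements as long as the condition is satisfied
--         if word in increase_keywords: # If statement that is used to check the condition
--             suspicion_level += 10  # Increase suspicion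
--         elif word in decrease_keywords: # Elif statement written proceeding the if statement to test the alternative condition
--             suspicion_level -= 25  # Decrease suspicion
--     return suspicion_level # Returns the output from the function
-- ===== SOURCE B (Python) =====
-- def adjust_suspicion(response, suspicion_level):
--     increase_keywords = ["bite", "starve", "infect", "hungry", "eat", "visiting", "hunger", "dying", "die"]
--     decrease_keywords = ["friend", "business", "lover", "doctor", "medicine"]
--     # Build a frequency table of the words once, then sum by keyword.
--     freq = {}
--     for word in response.lower().split():
--         freq[word] = freq.get(word, 0) + 1
--     inc = sum(freq.get(k, 0) for k in increase_keywords)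
--     dec = sum(freq.get(k, 0) for k in decrease_keywords)
--     return suspicion_level + 10 * inc - 25 * dec
-- ===== Notes on version B (the rewrite author's own statement) =====
-- stated objective: alternative
-- what changed: Replaced the per-word branching scan (membership test against both keyword lists for every word) by a single frequency-table pass over the words followed by a keyword-indexed summation (10*sum of increase counts minus 25*sum of decrease counts); correctness rests on the two keyword lists being disjoint.
import Mathlib
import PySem

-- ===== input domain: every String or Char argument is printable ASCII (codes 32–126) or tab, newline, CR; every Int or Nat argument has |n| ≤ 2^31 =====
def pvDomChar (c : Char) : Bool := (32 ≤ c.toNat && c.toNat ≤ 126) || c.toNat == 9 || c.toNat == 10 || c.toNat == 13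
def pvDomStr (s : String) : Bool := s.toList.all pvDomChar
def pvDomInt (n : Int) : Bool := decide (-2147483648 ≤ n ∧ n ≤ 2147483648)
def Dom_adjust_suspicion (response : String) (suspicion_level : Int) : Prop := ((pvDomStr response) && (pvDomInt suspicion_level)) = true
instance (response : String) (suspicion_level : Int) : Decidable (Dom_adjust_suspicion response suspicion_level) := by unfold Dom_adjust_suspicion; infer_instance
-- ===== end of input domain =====

-- B replaces A's per-word branching scan by a word-frequency table plus keyword-indexed sums (alternative decomposition, same cost).


-- ===== PORT A =====
def increaseKeywords : List String := ["bite", "starve", "infect", "hungry", "eat", "visiting", "hunger", "dying", "die"]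
def decreaseKeywords : List String := ["friend", "business", "lover", "doctor", "medicine"]

def adjust_suspicion (response : String) (suspicion_level : Int) : Int :=
  let words := PySem.Str.split₀ (PySem.Str.lower response)
  words.foldl (fun suspicion word =>
    if word ∈ increaseKeywords then suspicion + 10
    else if word ∈ decreaseKeywords then suspicion - 25
    else suspicion) suspicion_level

-- ===== PORT B =====
def adjust_suspicion_alt (response : String) (suspicion_level : Int) : Int :=
  let words := PySem.Str.split₀ (PySem.Str.lower response)
  let freq : PySem.Dict String Int :=
    words.foldl (fun d w => d.insert w (d.getD w 0 + 1)) PySem.Dict.empty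
  let inc := (increaseKeywords.map (fun k => freq.getD k 0)).sum
  let dec := (decreaseKeywords.map (fun k => freq.getD k 0)).sum
  suspicion_level + 10 * inc - 25 * dec

-- ===== PRECONDITION & SPEC =====
def Spec_adjust_suspicion (response : String) (suspicion_level : Int) (out : Int) : Prop := out = adjust_suspicion_alt response suspicion_level
instance (response : String) (suspicion_level : Int) (out : Int) : Decidable (Spec_adjust_suspicion response suspicion_level out) := by unfold Spec_adjust_suspicion; infer_instance

-- ===== CLAIM (what is proved, stated in full; the proofs are below) =====
def Claim_equal_adjust_suspicion : Prop := ∀ (response : String) (suspicion_level : Int), Dom_adjust_suspicion response suspicion_level → Spec_adjust_suspicion response suspicion_level (adjust_suspicion response suspicion_level)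

-- ===== LEMMAS AND PROOFS =====

-- summing counts over a duplicate-free keyword list: prepending a word bumps the sum by 1 iff the word is a keyword
lemma sum_count_cons (L : List String) (hL : L.Nodup) (w : String) (ws : List String) :
    (L.map (fun k => ((w :: ws).count k : Int))).sum
      = (L.map (fun k => (ws.count k : Int))).sum + (if w ∈ L then 1 else 0) := by
  induction L with
  | nil => simp
  | cons k L ih =>
    rcases List.nodup_cons.mp hL with ⟨hk, hL'⟩
    simp only [List.map_cons, List.sum_cons, List.mem_cons]
    rw [ih hL']
    have hcnt : (((w :: ws).count k : Nat) : Int) = (ws.count k : Int) + (if w = k then 1 else 0) := by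
      by_cases h : w = k <;> simp [h]
    rw [hcnt]
    by_cases hwk : w = k
    · subst hwk
      simp [hk]
      ring
    · simp only [hwk, if_false, false_or]
      ring

lemma inc_dec_disjoint (w : String) (h : w ∈ increaseKeywords) : w ∉ decreaseKeywords := by
  simp only [increaseKeywords, decreaseKeywords, List.mem_cons, List.not_mem_nil, or_false] at h ⊢
  rcases h with h|h|h|h|h|h|h|h|h <;> subst h <;> decide

lemma foldl_scan_eq (ws : List String) (s : Int) :
    ws.foldl (fun suspicion word =>
      if word ∈ increaseKeywords then suspicion + 10
      else if word ∈ decreaseKeywords then suspicion - 25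
      else suspicion) s
    = s + 10 * (increaseKeywords.map (fun k => (ws.count k : Int))).sum
        - 25 * (decreaseKeywords.map (fun k => (ws.count k : Int))).sum := by
  induction ws generalizing s with
  | nil => simp
  | cons w ws ih =>
    have hinc : increaseKeywords.Nodup := by decide
    have hdec : decreaseKeywords.Nodup := by decide
    simp only [List.foldl_cons, ih, sum_count_cons _ hinc w ws, sum_count_cons _ hdec w ws]
    by_cases h1 : w ∈ increaseKeywords
    · have h2 := inc_dec_disjoint w h1
      simp only [h1, h2, if_pos, if_false]
      ring
    · by_cases h2 : w ∈ decreaseKeywords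
      · simp only [h1, h2, if_true, if_false]
        ring
      · simp only [h1, h2, if_false]
        ring

-- ===== VERDICT (by name: the statement is the Claim_ definition above) =====
theorem adjust_suspicion_spec : Claim_equal_adjust_suspicion := by
  intro response suspicion_level _
  unfold Spec_adjust_suspicion adjust_suspicion adjust_suspicion_alt
  simp only [PySem.Dict.getD_foldl_insert_add_one, PySem.Dict.getD_empty, zero_add]
  exact foldl_scan_eq _ _
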